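-- pv_equiv track=rewrite | github.com/mvarrone/stp-project | backend/graph/code.py | modify_stp_parsed_data
-- ===== SOURCE A (Python) =====
-- from typing import List, Dict, Any
--
-- def modify_stp_parsed_data(parsed_stp_output, device_type) -> List[Dict[str, str]]:
--     if device_type == "cisco_ios":
--         for entry in parsed_stp_output:
--             if 'interface' in entry:
--                 entry['interface'] = entry['interface'].replace('Gi', 'G ')
--
--             if 'role' in entry:
--                 entry['role'] = entry['role'].replace('Desg', 'Designated')
--
--             if 'role' in entry:
--                 entry['role'] = entry['role'].replace('Altn', 'Alternate')
--
--             if 'status' in entry: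
--                 entry['status'] = entry['status'].replace('FWD', 'Forwarding')
--
--             if 'status' in entry:
--                 entry['status'] = entry['status'].replace('BLK', 'Blocking')
--
--             if 'type' in entry:
--                 entry['type'] = entry['type'].replace('Shr ', 'Shr')
--
--         return parsed_stp_output
-- ===== SOURCE B (Python) =====
-- # Rules-table rewrite: one replacement table keyed by field name, applied per entry.
-- # Note: A mutates the entry dicts in place; B builds fresh dicts (return value is identical).
-- RULES = {
--     'interface': [('Gi', 'G ')],
--     'role': [('Desg', 'Designated'), ('Altn', 'Alternate')],
--     'status': [('FWD', 'Forwarding'), ('BLK', 'Blocking')],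
--     'type': [('Shr ', 'Shr')],
-- }
--
-- def modify_stp_parsed_data(parsed_stp_output, device_type):
--     if device_type != "cisco_ios":
--         return None
--     result = []
--     for entry in parsed_stp_output:
--         new_entry = {}
--         for key, value in entry.items():
--             for old, new in RULES.get(key, []):
--                 value = value.replace(old, new)
--             new_entry[key] = value
--         result.append(new_entry)
--     return result
-- ===== Notes on version B (the rewrite author's own statement) =====
-- stated objective: idiomatic
-- what changed: Replaces the six hard-coded membership-guarded in-place field rewrites with a declarative replacement-rules table applied uniformly over each entry's items, building fresh entries instead of mutating.
import Mathlib
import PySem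

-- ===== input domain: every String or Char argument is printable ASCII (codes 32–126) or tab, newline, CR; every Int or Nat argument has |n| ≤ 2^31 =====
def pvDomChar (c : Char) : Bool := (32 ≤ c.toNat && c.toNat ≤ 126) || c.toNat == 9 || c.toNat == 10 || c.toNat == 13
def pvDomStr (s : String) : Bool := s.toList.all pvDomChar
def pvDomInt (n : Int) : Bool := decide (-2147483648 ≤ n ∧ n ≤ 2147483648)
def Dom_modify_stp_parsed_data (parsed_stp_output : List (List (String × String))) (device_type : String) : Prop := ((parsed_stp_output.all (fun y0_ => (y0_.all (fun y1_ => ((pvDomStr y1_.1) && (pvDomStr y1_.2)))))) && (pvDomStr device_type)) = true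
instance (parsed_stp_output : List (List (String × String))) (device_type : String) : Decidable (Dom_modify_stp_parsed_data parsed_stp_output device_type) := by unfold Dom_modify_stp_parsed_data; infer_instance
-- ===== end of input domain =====

-- B replaces A's six hard-coded guarded in-place field rewrites by a replacement-rules
-- table applied uniformly over each entry's items (idiomatic; A mutates its argument's
-- entries in place, B builds fresh ones — the equivalence proved is about the return value).


-- ===== PORT A =====
-- "if k in entry: entry[k] = entry[k].replace(old, new)"  (entry[k] is guarded, so getD never sees its default)
def pvStepA (d : PySem.Dict String String) (k old new : String) : PySem.Dict String String :=
  if d.contains k then d.insert k (PySem.Str.replace (d.getD k "") old new) else d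

def pvFixEntryA (entry : List (String × String)) : List (String × String) :=
  let d := PySem.Dict.mk entry
  let d := pvStepA d "interface" "Gi" "G "
  let d := pvStepA d "role" "Desg" "Designated"
  let d := pvStepA d "role" "Altn" "Alternate"
  let d := pvStepA d "status" "FWD" "Forwarding"
  let d := pvStepA d "status" "BLK" "Blocking"
  let d := pvStepA d "type" "Shr " "Shr"
  d.items

def modify_stp_parsed_data (parsed_stp_output : List (List (String × String))) (device_type : String) : Option (List (List (String × String))) :=
  if device_type == "cisco_ios" then some (parsed_stp_output.map pvFixEntryA) else none

-- ===== PORT B =====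
def pvRules : PySem.Dict String (List (String × String)) :=
  PySem.Dict.ofList
    [ ("interface", [("Gi", "G ")])
    , ("role", [("Desg", "Designated"), ("Altn", "Alternate")])
    , ("status", [("FWD", "Forwarding"), ("BLK", "Blocking")])
    , ("type", [("Shr ", "Shr")]) ]

def pvFixEntryB (entry : List (String × String)) : List (String × String) :=
  entry.map (fun p =>
    (p.1, (pvRules.getD p.1 []).foldl (fun v r => PySem.Str.replace v r.1 r.2) p.2))

def modify_stp_parsed_data_alt (parsed_stp_output : List (List (String × String))) (device_type : String) : Option (List (List (String × String))) :=
  if device_type == "cisco_ios" then some (parsed_stp_output.map pvFixEntryB) else none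

-- ===== PRECONDITION & SPEC =====
-- Pre_ excludes entry lists with duplicate keys: such a list is not a value of the Python
-- dict type the function receives (a dict never has duplicate keys), so A's behaviour there
-- is not defined by the source.
def Pre_modify_stp_parsed_data (parsed_stp_output : List (List (String × String))) (device_type : String) : Prop :=
  ∀ entry ∈ parsed_stp_output, (entry.map Prod.fst).Nodup
instance (parsed_stp_output : List (List (String × String))) (device_type : String) : Decidable (Pre_modify_stp_parsed_data parsed_stp_output device_type) := by unfold Pre_modify_stp_parsed_data; infer_instance

def pvWitness_modify_stp_parsed_data : (List (List (String × String))) × String :=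
  ([[("interface", "Gi1"), ("role", "Desg"), ("status", "FWD"), ("type", "Shr P2p")]], "cisco_ios")

def Spec_modify_stp_parsed_data (parsed_stp_output : List (List (String × String))) (device_type : String) (out : Option (List (List (String × String)))) : Prop := out = modify_stp_parsed_data_alt parsed_stp_output device_type
instance (parsed_stp_output : List (List (String × String))) (device_type : String) (out : Option (List (List (String × String)))) : Decidable (Spec_modify_stp_parsed_data parsed_stp_output device_type out) := by unfold Spec_modify_stp_parsed_data; infer_instance

-- ===== CLAIM (what is proved, stated in full; the proofs are below) =====
def Claim_equal_modify_stp_parsed_data : Prop := ∀ (parsed_stp_output : List (List (String × String))) (device_type : String), Dom_modify_stp_parsed_data parsed_stp_output device_type → Pre_modify_stp_parsed_data parsed_stp_output device_type → Spec_modify_stp_parsed_data parsed_stp_output device_type (modify_stp_parsed_data parsed_stp_output device_type)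

-- ===== LEMMAS AND PROOFS =====

-- the per-key value rewriters after each of A's six steps (proof-local)
def pvG0 (_a b : String) : String := b
def pvG1 (a b : String) : String := if a = "interface" then PySem.Str.replace (pvG0 a b) "Gi" "G " else pvG0 a b
def pvG2 (a b : String) : String := if a = "role" then PySem.Str.replace (pvG1 a b) "Desg" "Designated" else pvG1 a b
def pvG3 (a b : String) : String := if a = "role" then PySem.Str.replace (pvG2 a b) "Altn" "Alternate" else pvG2 a b
def pvG4 (a b : String) : String := if a = "status" then PySem.Str.replace (pvG3 a b) "FWD" "Forwarding" else pvG3 a b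
def pvG5 (a b : String) : String := if a = "status" then PySem.Str.replace (pvG4 a b) "BLK" "Blocking" else pvG4 a b
def pvG6 (a b : String) : String := if a = "type" then PySem.Str.replace (pvG5 a b) "Shr " "Shr" else pvG5 a b

-- One guarded step, on a duplicate-free dict whose items are entry rewritten pointwise by g,
-- yields entry rewritten pointwise by g followed by the replacement at key k.
lemma pvStepA_items (entry : List (String × String)) (hnd : (entry.map Prod.fst).Nodup)
    (g : String → String → String) (k old new : String)
    (d : PySem.Dict String String)
    (hd : d.items = entry.map (fun p => (p.1, g p.1 p.2))) :
    (pvStepA d k old new).items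
      = entry.map (fun p =>
          (p.1, if p.1 = k then PySem.Str.replace (g p.1 p.2) old new else g p.1 p.2)) := by
  have hkeys : d.keys = entry.map Prod.fst := by
    show d.items.map Prod.fst = _
    simp [hd, List.map_map, Function.comp]
  have hknd : d.keys.Nodup := by rw [hkeys]; exact hnd
  unfold pvStepA
  by_cases hc : d.contains k = true
  · rw [if_pos hc, PySem.Dict.items_insert_of_contains _ _ hc, hd, List.map_map]
    refine List.map_congr_left (fun p hp => ?_)
    by_cases hpk : p.1 = k
    · have hmem : (p.1, g p.1 p.2) ∈ d.items := by
        rw [hd]; exact List.mem_map_of_mem hp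
      have hget : d.getD p.1 "" = g p.1 p.2 := PySem.Dict.getD_of_mem_items _ hmem hknd ""
      simp [Function.comp, hpk ▸ hget, hpk]
    · simp [Function.comp, hpk]
  · rw [if_neg hc]
    have hnk : ∀ p ∈ entry, p.1 ≠ k := by
      intro p hp hpk
      apply hc
      rw [PySem.Dict.contains_iff_mem_keys, hkeys]
      exact hpk ▸ List.mem_map_of_mem hp
    rw [hd]
    exact List.map_congr_left (fun p hp => by simp [hnk p hp])

-- the rules-table fold of B computes exactly the composition of A's six per-key replacements
lemma pvRules_fold (k v : String) :
    (pvRules.getD k []).foldl (fun v r => PySem.Str.replace v r.1 r.2) v = pvG6 k v := by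
  have hrw : pvRules
      = ((((PySem.Dict.empty.insert "interface" [("Gi", "G ")]).insert "role"
            [("Desg", "Designated"), ("Altn", "Alternate")]).insert "status"
            [("FWD", "Forwarding"), ("BLK", "Blocking")]).insert "type" [("Shr ", "Shr")]) := by rfl
  rw [hrw]
  by_cases h1 : k = "interface" <;> by_cases h2 : k = "role" <;> by_cases h3 : k = "status" <;>
    by_cases h4 : k = "type" <;>
    simp_all [PySem.Dict.getD_insert, PySem.Dict.getD_empty,
      pvG6, pvG5, pvG4, pvG3, pvG2, pvG1, pvG0]

lemma pvFixEntry_eq (entry : List (String × String)) (hnd : (entry.map Prod.fst).Nodup) :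
    pvFixEntryA entry = pvFixEntryB entry := by
  have h0 : (PySem.Dict.mk entry).items = entry.map (fun p => (p.1, pvG0 p.1 p.2)) := by
    simp [pvG0]
  have h1 := pvStepA_items entry hnd pvG0 "interface" "Gi" "G " _ h0
  have h2 := pvStepA_items entry hnd pvG1 "role" "Desg" "Designated" _ h1
  have h3 := pvStepA_items entry hnd pvG2 "role" "Altn" "Alternate" _ h2
  have h4 := pvStepA_items entry hnd pvG3 "status" "FWD" "Forwarding" _ h3
  have h5 := pvStepA_items entry hnd pvG4 "status" "BLK" "Blocking" _ h4
  have h6 := pvStepA_items entry hnd pvG5 "type" "Shr " "Shr" _ h5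
  have hA : pvFixEntryA entry = entry.map (fun p => (p.1, pvG6 p.1 p.2)) := h6
  rw [hA]
  unfold pvFixEntryB
  exact List.map_congr_left (fun p _ => by rw [pvRules_fold p.1 p.2])

-- ===== VERDICT (by name: the statement is the Claim_ definition above) =====
theorem modify_stp_parsed_data_spec : Claim_equal_modify_stp_parsed_data := by
  intro ps dt _ hpre
  show _ = _
  unfold modify_stp_parsed_data modify_stp_parsed_data_alt
  by_cases h : dt == "cisco_ios"
  · rw [if_pos h, if_pos h]
    exact congrArg some (List.map_congr_left (fun e he => pvFixEntry_eq e (hpre e he)))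
  · rw [if_neg h, if_neg h]
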